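-- pv_equiv track=rewrite | github.com/akarmain/vanilla_code | Competitions/Codeforces Round/Educational Codeforces Round 152 (Rated for Div. 2) /D Покраска массива.py | min_coins_to_red
-- ===== SOURCE A (Python) =====
-- def min_coins_to_red(n, arr):
--     coins_spent = 0
--
--     for i in range(n):
--         if arr[i] == 0:
--             continue
--
--         if arr[i] == 1:
--             if i < n - 1 and arr[i + 1] == 0:
--                 coins_spent += 1
--                 arr[i + 1] = 1
--
--         elif arr[i] == 2:
--             if i < n - 1 and arr[i + 1] == 0:
--                 coins_spent += 1
--                 arr[i + 1] = 1
--             coins_spent += 1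
--             arr[i] = 1
--
--     return coins_spent
-- ===== SOURCE B (Python) =====
-- def min_coins_to_red(n, arr):
--     # Gap-counting reformulation: collect the positions of nonzero elements once,
--     # then charge 1 per 2 and, for each nonzero red value (1 or 2), the whole run
--     # of zeros up to the next nonzero position (those all get painted by cascade).
--     # Unlike A this does not mutate arr; the return value is what is proved equal.
--     nz = [i for i in range(n) if arr[i] != 0]
--     coins = 0
--     for i, nxt in zip(nz, nz[1:] + [n]):
--         v = arr[i]
--         if v == 2:
--             coins += 1
--         if v == 1 or v == 2:
--             coins += nxt - i - 1
--     return coins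
-- ===== Notes on version B (the rewrite author's own statement) =====
-- stated objective: alternative
-- what changed: Replaces A's single-pass cascading in-place mutation with a staged gap-counting scheme: first collect the list of nonzero positions, then sum one coin per 2 and, for each 1/2, the length of the zero gap to the next nonzero position; B never writes to arr (A mutates it in place; the return value is what is proved equal).
import Mathlib
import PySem

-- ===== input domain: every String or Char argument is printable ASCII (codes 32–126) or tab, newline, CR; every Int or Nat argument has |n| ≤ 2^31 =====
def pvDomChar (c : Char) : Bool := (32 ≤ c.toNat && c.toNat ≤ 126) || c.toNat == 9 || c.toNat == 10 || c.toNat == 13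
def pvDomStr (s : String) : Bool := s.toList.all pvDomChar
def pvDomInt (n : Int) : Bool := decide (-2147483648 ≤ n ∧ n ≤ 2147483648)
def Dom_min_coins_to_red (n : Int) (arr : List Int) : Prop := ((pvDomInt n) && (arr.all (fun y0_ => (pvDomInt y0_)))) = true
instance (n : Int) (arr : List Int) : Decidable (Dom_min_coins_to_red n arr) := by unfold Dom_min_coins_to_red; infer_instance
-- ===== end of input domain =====

-- B replaces A's cascading in-place mutation by a staged gap-counting scheme over the
-- list of nonzero positions; A mutates arr in place, B does not — the equivalence
-- proved here is about the return value only.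

-- ===== PORT A =====
-- one loop iteration of A: state = (coins_spent, current array)
def pvStepA (n : Int) (st : Int × List Int) (i : Int) : Int × List Int :=
  let c := st.1
  let a := st.2
  let v := PySem.List.pyGetD a i 0
  if v = 0 then st
  else if v = 1 then
    (if i < n - 1 ∧ PySem.List.pyGetD a (i + 1) 0 = 0 then (c + 1, a.set (i + 1).toNat 1)
     else (c, a))
  else if v = 2 then
    let st2 :=
      if i < n - 1 ∧ PySem.List.pyGetD a (i + 1) 0 = 0 then (c + 1, a.set (i + 1).toNat 1)
      else (c, a)
    (st2.1 + 1, st2.2.set i.toNat 1)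
  else st

def min_coins_to_red (n : Int) (arr : List Int) : Int :=
  ((PySem.List.pyRange 0 n 1).foldl (pvStepA n) (0, arr)).1

-- ===== PORT B =====
-- one iteration of B's pair loop: p = (i, nxt) = a nonzero position and its successor
def pvStepGap (arr : List Int) (c : Int) (p : Int × Int) : Int :=
  let v := PySem.List.pyGetD arr p.1 0
  let c := if v = 2 then c + 1 else c
  if v = 1 ∨ v = 2 then c + (p.2 - p.1 - 1) else c

def min_coins_to_red_alt (n : Int) (arr : List Int) : Int :=
  let nz := (PySem.List.pyRange 0 n 1).filter (fun i => decide (PySem.List.pyGetD arr i 0 ≠ 0))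
  let pairs := nz.zip (nz.drop 1 ++ [n])
  pairs.foldl (pvStepGap arr) 0

-- ===== PRECONDITION & SPEC =====
-- A raises IndexError iff n > len(arr); that is all Pre_ excludes.
def Pre_min_coins_to_red (n : Int) (arr : List Int) : Prop := n ≤ (arr.length : Int)
instance (n : Int) (arr : List Int) : Decidable (Pre_min_coins_to_red n arr) := by
  unfold Pre_min_coins_to_red; infer_instance
def pvWitness_min_coins_to_red : Int × List Int := (3, [2, 0, 1])

def Spec_min_coins_to_red (n : Int) (arr : List Int) (out : Int) : Prop := out = min_coins_to_red_alt n arr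
instance (n : Int) (arr : List Int) (out : Int) : Decidable (Spec_min_coins_to_red n arr out) := by unfold Spec_min_coins_to_red; infer_instance

-- ===== CLAIM (what is proved, stated in full; the proofs are below) =====
def Claim_equal_min_coins_to_red : Prop := ∀ (n : Int) (arr : List Int), Dom_min_coins_to_red n arr → Pre_min_coins_to_red n arr → Spec_min_coins_to_red n arr (min_coins_to_red n arr)

-- ===== LEMMAS AND PROOFS =====

-- intermediate carry-flag formulation used only by the proof: `live` says whether the
-- previous cell ends up red after A's cascade
def pvStepB (arr : List Int) (st : Int × Bool) (i : Int) : Int × Bool :=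
  let v := PySem.List.pyGetD arr i 0
  ((if v = 2 ∨ (v = 0 ∧ st.2) then st.1 + 1 else st.1),
   (v = 1 ∨ v = 2 ∨ (v = 0 ∧ st.2) : Bool))

-- the "paid-ahead" flag at loop boundary s: A has already painted position s (and paid
-- its coin) exactly when the previous final value is red, arr[s] = 0 and s is in range.
def pvPaid (n : Int) (arr : List Int) (s : Int) (l : Bool) : Bool :=
  l && decide (PySem.List.pyGetD arr s 0 = 0) && decide (s < n)

-- pyGetD at a nonnegative index is List.getD
theorem pv_getD_nonneg (xs : List Int) (j : Int) (h : 0 ≤ j) :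
    PySem.List.pyGetD xs j 0 = xs.getD j.toNat 0 := by
  have h2 : ((j.toNat : Int)) = j := Int.toNat_of_nonneg h
  calc PySem.List.pyGetD xs j 0 = PySem.List.pyGetD xs (j.toNat : Int) 0 := by rw [h2]
    _ = xs.getD j.toNat 0 := PySem.List.pyGetD_natCast ..

theorem pv_getD_set_self (xs : List Int) (m : Nat) (v : Int) (h : m < xs.length) :
    (xs.set m v).getD m 0 = v := by
  simp [List.getD, h]

theorem pv_getD_set_ne (xs : List Int) (m k : Nat) (v : Int) (h : m ≠ k) :
    (xs.set m v).getD k 0 = xs.getD k 0 := by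
  simp [List.getD, List.getElem?_set_ne, h]

-- loop invariant relating A's mutating fold to the carry-flag fold
theorem pv_inv : ∀ (k : Nat) (n s cb : Int) (l : Bool) (a arr : List Int),
    0 ≤ s → n ≤ (arr.length : Int) → a.length = arr.length → (n - s).toNat = k →
    (∀ j : Int, s < j → PySem.List.pyGetD a j 0 = PySem.List.pyGetD arr j 0) →
    PySem.List.pyGetD a s 0 =
      (if pvPaid n arr s l then 1 else PySem.List.pyGetD arr s 0) →
    ((PySem.List.pyRange s n 1).foldl (pvStepA n)
        (cb + (if pvPaid n arr s l then 1 else 0), a)).1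
      = ((PySem.List.pyRange s n 1).foldl (pvStepB arr) (cb, l)).1 := by
  intro k
  induction k with
  | zero =>
    intro n s cb l a arr hs hn hl hk hgt hgs
    have hns : n ≤ s := by omega
    rw [PySem.List.pyRange_one_eq_nil hns]
    have hp : pvPaid n arr s l = false := by
      unfold pvPaid; simp; omega
    simp [hp]

  | succ k ih =>
    intro n s cb l a arr hs hn hl hk hgt hgs
    have hsn : s < n := by omega
    rw [PySem.List.pyRange_one_cons hsn]
    simp only [List.foldl_cons]
    have hs1 : (0:Int) ≤ s + 1 := by omega
    have hgt1 : PySem.List.pyGetD a (s+1) 0 = PySem.List.pyGetD arr (s+1) 0 :=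
      hgt (s+1) (by omega)
    obtain ⟨w, hw⟩ : ∃ w, PySem.List.pyGetD arr s 0 = w := ⟨_, rfl⟩
    have hB : pvStepB arr (cb, l) s
        = ((if w = 2 ∨ (w = 0 ∧ l = true) then cb + 1 else cb),
           (decide (w = 1 ∨ w = 2 ∨ (w = 0 ∧ l = true)))) := by
      simp [pvStepB, hw]
    have hpc : pvPaid n arr s l = (l && decide (w = 0)) := by
      unfold pvPaid; rw [hw]; simp [hsn]
    rw [hw] at hgs
    have hset_ne : ∀ (xs : List Int) (m : Int) (j : Int), 0 ≤ m → m < j →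
        PySem.List.pyGetD (xs.set m.toNat 1) j 0 = PySem.List.pyGetD xs j 0 := by
      intro xs m j hm hj
      rw [pv_getD_nonneg _ j (by omega), pv_getD_nonneg _ j (by omega)]
      exact pv_getD_set_ne xs m.toNat j.toNat 1 (by omega)
    have hlen1 : s + 1 < n → ((s+1).toNat < a.length) := by
      intro h; omega
    by_cases hw0 : w = 0
    · by_cases hltrue : l = true
      · -- painted zero: A reads a 1 here, B pays that coin at this step instead
        have hpcv : pvPaid n arr s l = true := by rw [hpc, hltrue, hw0]; simp
        have hvA : PySem.List.pyGetD a s 0 = 1 := by rw [hgs, hpcv]; simp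
        by_cases hc : s < n - 1 ∧ PySem.List.pyGetD arr (s+1) 0 = 0
        · obtain ⟨hc1, hc2⟩ := hc
          have hA : pvStepA n (cb + (if pvPaid n arr s l = true then 1 else 0), a) s
              = (cb + 1 + 1, a.set (s+1).toNat 1) := by
            simp [pvStepA, hvA, hpcv, hgt1, hc1, hc2]
          have hp' : pvPaid n arr (s+1) (decide (w = 1 ∨ w = 2 ∨ (w = 0 ∧ l = true))) = true := by
            unfold pvPaid; simp [hw0, hltrue, hc2]; omega
          rw [hA, hB]
          have := ih n (s+1) (cb + 1) (decide (w = 1 ∨ w = 2 ∨ (w = 0 ∧ l = true)))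
            (a.set (s+1).toNat 1) arr hs1 hn (by simpa using hl) (by omega)
            (fun j hj => by rw [hset_ne a (s+1) j (by omega) hj]; exact hgt j (by omega))
            (by
              rw [hp', pv_getD_nonneg _ (s+1) hs1,
                pv_getD_set_self a (s+1).toNat 1 (hlen1 (by omega))]; simp)
          rw [hp'] at this
          simpa [hw0, hltrue] using this
        · have hA : pvStepA n (cb + (if pvPaid n arr s l = true then 1 else 0), a) s
              = (cb + 1, a) := by
            simp [pvStepA, hvA, hpcv, hgt1, hc]
          have hp' : pvPaid n arr (s+1) (decide (w = 1 ∨ w = 2 ∨ (w = 0 ∧ l = true))) = false := by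
            unfold pvPaid
            by_cases h1 : s + 1 < n
            · have h2 : ¬ PySem.List.pyGetD arr (s+1) 0 = 0 := fun h => hc ⟨by omega, h⟩
              simp [h2]
            · simp [h1]
          rw [hA, hB]
          have := ih n (s+1) (cb + 1) (decide (w = 1 ∨ w = 2 ∨ (w = 0 ∧ l = true)))
            a arr hs1 hn hl (by omega)
            (fun j hj => hgt j (by omega))
            (by rw [hp', hgt1]; simp)
          rw [hp'] at this
          simpa [hw0, hltrue] using this
      · -- dead zero: both sides skip
        have hlf : l = false := by cases l <;> simp_all
        have hpcv : pvPaid n arr s l = false := by rw [hpc, hlf]; simp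
        have hvA : PySem.List.pyGetD a s 0 = 0 := by rw [hgs, hpcv]; simp [hw0]
        have hA : pvStepA n (cb + (if pvPaid n arr s l = true then 1 else 0), a) s
            = (cb, a) := by
          simp [pvStepA, hvA, hpcv]
        have hp' : pvPaid n arr (s+1) (decide (w = 1 ∨ w = 2 ∨ (w = 0 ∧ l = true))) = false := by
          unfold pvPaid; simp [hw0, hlf]
        rw [hA, hB]
        have := ih n (s+1) cb (decide (w = 1 ∨ w = 2 ∨ (w = 0 ∧ l = true)))
          a arr hs1 hn hl (by omega)
          (fun j hj => hgt j (by omega))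
          (by rw [hp', hgt1]; simp)
        rw [hp'] at this
        simpa [hw0, hlf] using this
    · -- w ≠ 0: A reads the original value, no coin was pre-paid
      have hpcv : pvPaid n arr s l = false := by rw [hpc]; simp [hw0]
      have hvA : PySem.List.pyGetD a s 0 = w := by rw [hgs, hpcv]; simp
      by_cases hw1 : w = 1
      · by_cases hc : s < n - 1 ∧ PySem.List.pyGetD arr (s+1) 0 = 0
        · obtain ⟨hc1, hc2⟩ := hc
          have hA : pvStepA n (cb + (if pvPaid n arr s l = true then 1 else 0), a) s
              = (cb + 1, a.set (s+1).toNat 1) := by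
            simp [pvStepA, hvA, hpcv, hgt1, hw1, hc1, hc2]
          have hp' : pvPaid n arr (s+1) (decide (w = 1 ∨ w = 2 ∨ (w = 0 ∧ l = true))) = true := by
            unfold pvPaid; simp [hw1, hc2]; omega
          rw [hA, hB]
          have := ih n (s+1) cb (decide (w = 1 ∨ w = 2 ∨ (w = 0 ∧ l = true)))
            (a.set (s+1).toNat 1) arr hs1 hn (by simpa using hl) (by omega)
            (fun j hj => by rw [hset_ne a (s+1) j (by omega) hj]; exact hgt j (by omega))
            (by
              rw [hp', pv_getD_nonneg _ (s+1) hs1,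
                pv_getD_set_self a (s+1).toNat 1 (hlen1 (by omega))]; simp)
          rw [hp'] at this
          simpa [hw0, hw1] using this
        · have hA : pvStepA n (cb + (if pvPaid n arr s l = true then 1 else 0), a) s
              = (cb, a) := by
            simp [pvStepA, hvA, hpcv, hgt1, hw1, hc]
          have hp' : pvPaid n arr (s+1) (decide (w = 1 ∨ w = 2 ∨ (w = 0 ∧ l = true))) = false := by
            unfold pvPaid
            by_cases h1 : s + 1 < n
            · have h2 : ¬ PySem.List.pyGetD arr (s+1) 0 = 0 := fun h => hc ⟨by omega, h⟩
              simp [h2]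
            · simp [h1]
          rw [hA, hB]
          have := ih n (s+1) cb (decide (w = 1 ∨ w = 2 ∨ (w = 0 ∧ l = true)))
            a arr hs1 hn hl (by omega)
            (fun j hj => hgt j (by omega))
            (by rw [hp', hgt1]; simp)
          rw [hp'] at this
          simpa [hw0, hw1] using this
      · by_cases hw2 : w = 2
        · by_cases hc : s < n - 1 ∧ PySem.List.pyGetD arr (s+1) 0 = 0
          · obtain ⟨hc1, hc2⟩ := hc
            have hA : pvStepA n (cb + (if pvPaid n arr s l = true then 1 else 0), a) s
                = (cb + 1 + 1, (a.set (s+1).toNat 1).set s.toNat 1) := by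
              simp [pvStepA, hvA, hpcv, hgt1, hw2, hc1, hc2]
            have hp' : pvPaid n arr (s+1) (decide (w = 1 ∨ w = 2 ∨ (w = 0 ∧ l = true))) = true := by
              unfold pvPaid; simp [hw2, hc2]; omega
            rw [hA, hB]
            have := ih n (s+1) (cb + 1) (decide (w = 1 ∨ w = 2 ∨ (w = 0 ∧ l = true)))
              ((a.set (s+1).toNat 1).set s.toNat 1) arr hs1 hn (by simpa using hl) (by omega)
              (fun j hj => by
                rw [hset_ne _ s j hs (by omega), hset_ne a (s+1) j (by omega) hj]
                exact hgt j (by omega))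
              (by
                rw [hp', hset_ne _ s (s+1) hs (by omega), pv_getD_nonneg _ (s+1) hs1,
                  pv_getD_set_self a (s+1).toNat 1 (hlen1 (by omega))]; simp)
            rw [hp'] at this
            simpa [hw0, hw1, hw2] using this
          · have hA : pvStepA n (cb + (if pvPaid n arr s l = true then 1 else 0), a) s
                = (cb + 1, a.set s.toNat 1) := by
              simp [pvStepA, hvA, hpcv, hgt1, hw2, hc]
            have hp' : pvPaid n arr (s+1) (decide (w = 1 ∨ w = 2 ∨ (w = 0 ∧ l = true))) = false := by
              unfold pvPaid
              by_cases h1 : s + 1 < n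
              · have h2 : ¬ PySem.List.pyGetD arr (s+1) 0 = 0 := fun h => hc ⟨by omega, h⟩
                simp [h2]
              · simp [h1]
            rw [hA, hB]
            have := ih n (s+1) (cb + 1) (decide (w = 1 ∨ w = 2 ∨ (w = 0 ∧ l = true)))
              (a.set s.toNat 1) arr hs1 hn (by simpa using hl) (by omega)
              (fun j hj => by
                rw [hset_ne _ s j hs (by omega)]; exact hgt j (by omega))
              (by rw [hp', hset_ne _ s (s+1) hs (by omega), hgt1]; simp)
            rw [hp'] at this
            simpa [hw0, hw1, hw2] using this
        · -- any other value: A skips it, B's live state dies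
          have hA : pvStepA n (cb + (if pvPaid n arr s l = true then 1 else 0), a) s
              = (cb, a) := by
            simp [pvStepA, hvA, hpcv, hw0, hw1, hw2]
          have hp' : pvPaid n arr (s+1) (decide (w = 1 ∨ w = 2 ∨ (w = 0 ∧ l = true))) = false := by
            unfold pvPaid; simp [hw0, hw1, hw2]
          rw [hA, hB]
          have := ih n (s+1) cb (decide (w = 1 ∨ w = 2 ∨ (w = 0 ∧ l = true)))
            a arr hs1 hn hl (by omega)
            (fun j hj => hgt j (by omega))
            (by rw [hp', hgt1]; simp)
          rw [hp'] at this
          simpa [hw0, hw1, hw2] using this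

-- ===== carry-flag fold = B's gap sum =====

-- the nonzero positions of arr in [s, n)
def pvNz (n : Int) (arr : List Int) (s : Int) : List Int :=
  (PySem.List.pyRange s n 1).filter (fun i => decide (PySem.List.pyGetD arr i 0 ≠ 0))

-- the contribution of one pair (i, nxt)
def pvG (arr : List Int) (p : Int × Int) : Int :=
  (if PySem.List.pyGetD arr p.1 0 = 2 then 1 else 0) +
  (if PySem.List.pyGetD arr p.1 0 = 1 ∨ PySem.List.pyGetD arr p.1 0 = 2 then p.2 - p.1 - 1 else 0)

def pvPairs (n : Int) (arr : List Int) (s : Int) : List (Int × Int) :=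
  (pvNz n arr s).zip ((pvNz n arr s).drop 1 ++ [n])

theorem pv_stepGap_shift (arr : List Int) (c : Int) (p : Int × Int) :
    pvStepGap arr c p = c + pvG arr p := by
  unfold pvStepGap pvG
  by_cases h2 : PySem.List.pyGetD arr p.1 0 = 2
  · simp [h2]
  · by_cases h1 : PySem.List.pyGetD arr p.1 0 = 1 <;> simp [h1, h2]

theorem pv_foldl_gap (arr : List Int) :
    ∀ (l : List (Int × Int)) (c : Int),
      l.foldl (pvStepGap arr) c = c + (l.map (pvG arr)).sum := by
  intro l
  induction l with
  | nil => intro c; simp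
  | cons p t ih => intro c; simp [List.foldl_cons, pv_stepGap_shift, ih]; ring

theorem pv_nz_cons (n : Int) (arr : List Int) (s : Int) (h : s < n) :
    pvNz n arr s =
      if PySem.List.pyGetD arr s 0 ≠ 0 then s :: pvNz n arr (s+1) else pvNz n arr (s+1) := by
  unfold pvNz
  rw [PySem.List.pyRange_one_cons h]
  by_cases hv : PySem.List.pyGetD arr s 0 ≠ 0 <;> simp [hv]

theorem pv_zip_cons (s n : Int) (t : List Int) :
    (s :: t).zip ((s :: t).drop 1 ++ [n]) = (s, t.headD n) :: t.zip (t.drop 1 ++ [n]) := by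
  cases t <;> simp

-- main bridge: the carry-flag fold over [s,n) equals the gap sum, plus (if the carry is
-- live) the length of the zero run from s to the next nonzero position
theorem pv_carry_gap : ∀ (k : Nat) (n : Int) (arr : List Int) (s cb : Int) (l : Bool),
    0 ≤ s → s ≤ n → (n - s).toNat = k →
    ((PySem.List.pyRange s n 1).foldl (pvStepB arr) (cb, l)).1
      = cb + (if l then (pvNz n arr s).headD n - s else 0)
          + ((pvPairs n arr s).map (pvG arr)).sum := by
  intro k
  induction k with
  | zero =>
    intro n arr s cb l hs hsn hk
    have hns : n = s := by omega
    subst hns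
    rw [PySem.List.pyRange_one_eq_nil (le_refl n)]
    have hnz : pvNz n arr n = [] := by
      unfold pvNz; rw [PySem.List.pyRange_one_eq_nil (le_refl n)]; rfl
    simp [pvPairs, hnz]
  | succ k ih =>
    intro n arr s cb l hs hsn hk
    have hsn' : s < n := by omega
    rw [PySem.List.pyRange_one_cons hsn']
    simp only [List.foldl_cons]
    obtain ⟨w, hw⟩ : ∃ w, PySem.List.pyGetD arr s 0 = w := ⟨_, rfl⟩
    have hnzc := pv_nz_cons n arr s hsn'
    rw [hw] at hnzc
    have hstep : pvStepB arr (cb, l) s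
        = ((if w = 2 ∨ (w = 0 ∧ l = true) then cb + 1 else cb),
           (decide (w = 1 ∨ w = 2 ∨ (w = 0 ∧ l = true)))) := by
      simp [pvStepB, hw]
    rw [hstep]
    have ih' := fun cb' l' => ih n arr (s+1) cb' l' (by omega) (by omega) (by omega)
    by_cases hw0 : w = 0
    · -- zero cell: nz and pairs unchanged, the gap (if live) grows by one
      have hnz : pvNz n arr s = pvNz n arr (s+1) := by rw [hnzc]; simp [hw0]
      have hpairs : pvPairs n arr s = pvPairs n arr (s+1) := by unfold pvPairs; rw [hnz]
      rw [ih' _ _, hpairs, hnz]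
      cases l
      · simp [hw0]
      · simp only [hw0]
        simp
        ring
    · -- nonzero cell: it heads nz, contributing its own pair; the live gap collapses to 0
      have hnz : pvNz n arr s = s :: pvNz n arr (s+1) := by rw [hnzc]; simp [hw0]
      have hpairs : pvPairs n arr s
          = (s, (pvNz n arr (s+1)).headD n) :: pvPairs n arr (s+1) := by
        unfold pvPairs; rw [hnz]; exact pv_zip_cons s n (pvNz n arr (s+1))
      have hheads : (pvNz n arr s).headD n = s := by rw [hnz]; rfl
      have hg : pvG arr (s, (pvNz n arr (s+1)).headD n)
          = (if w = 2 then 1 else 0)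
            + (if w = 1 ∨ w = 2 then (pvNz n arr (s+1)).headD n - s - 1 else 0) := by
        unfold pvG; rw [hw]
      rw [ih' _ _, hpairs, hheads]
      simp only [List.map_cons, List.sum_cons, hg]
      by_cases h1 : w = 1 <;> by_cases h2 : w = 2 <;>
        cases l <;> simp [hw0, h1, h2] <;> ring

theorem min_coins_to_red_spec : Claim_equal_min_coins_to_red := by
  intro n arr _ hpre
  unfold Spec_min_coins_to_red min_coins_to_red min_coins_to_red_alt
  show _ = (pvPairs n arr 0).foldl (pvStepGap arr) 0
  by_cases hn : n ≤ 0
  · rw [PySem.List.pyRange_one_eq_nil hn]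
    have hp : pvPairs n arr 0 = [] := by
      unfold pvPairs pvNz; rw [PySem.List.pyRange_one_eq_nil hn]; rfl
    rw [hp]
    rfl
  · have h0 : pvPaid n arr 0 false = false := by unfold pvPaid; simp
    have hA := pv_inv (n - 0).toNat n 0 0 false arr arr (le_refl 0) hpre rfl rfl
      (fun j hj => rfl) (by rw [h0]; simp)
    rw [h0] at hA
    norm_num at hA
    have hC := pv_carry_gap (n - 0).toNat n arr 0 0 false (le_refl 0) (by omega) rfl
    norm_num at hC
    rw [pv_foldl_gap arr (pvPairs n arr 0) 0, hA, hC]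
    ring
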